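-- pv_equiv track=rewrite | github.com/eurnie/AdventOfCode | 2021/06/puzzle2.py | cleanFishList
-- ===== SOURCE A (Python) =====
-- def cleanFishList(fishList):
--     fish0 = 0
--     fish1 = 0
--     fish2 = 0
--     fish3 = 0
--     fish4 = 0
--     fish5 = 0
--     fish6 = 0
--     fish7 = 0
--     fish8 = 0
--
--     for x in range(0, len(fishList)):
--         if (fishList[x][0] == 0):
--             fish0 += fishList[x][1]
--         elif (fishList[x][0] == 1):
--             fish1 += fishList[x][1]
--         elif (fishList[x][0] == 2):
--             fish2 += fishList[x][1]
--         elif (fishList[x][0] == 3):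
--             fish3 += fishList[x][1]
--         elif (fishList[x][0] == 4):
--             fish4 += fishList[x][1]
--         elif (fishList[x][0] == 5):
--             fish5 += fishList[x][1]
--         elif (fishList[x][0] == 6):
--             fish6 += fishList[x][1]
--         elif (fishList[x][0] == 7):
--             fish7 += fishList[x][1]
--         elif (fishList[x][0] == 8):
--             fish8 += fishList[x][1]
--
--     return [[0, fish0], [1, fish1], [2, fish2], [3, fish3], [4, fish4], [5, fish5], [6, fish6], [7, fish7], [8, fish8]]
-- ===== SOURCE B (Python) =====
-- def cleanFishList(fishList):
--     return [[t, sum(p[1] for p in fishList if p[0] == t)] for t in range(9)]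
-- ===== Notes on version B (the rewrite author's own statement) =====
-- stated objective: simpler
-- what changed: Replaces the single accumulating pass with nine named variables and a 9-way elif chain by nine staged filter-and-sum passes, one per timer bucket, computing each bucket's total independently as sum(p[1] for p with p[0]==t).
import Mathlib
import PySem

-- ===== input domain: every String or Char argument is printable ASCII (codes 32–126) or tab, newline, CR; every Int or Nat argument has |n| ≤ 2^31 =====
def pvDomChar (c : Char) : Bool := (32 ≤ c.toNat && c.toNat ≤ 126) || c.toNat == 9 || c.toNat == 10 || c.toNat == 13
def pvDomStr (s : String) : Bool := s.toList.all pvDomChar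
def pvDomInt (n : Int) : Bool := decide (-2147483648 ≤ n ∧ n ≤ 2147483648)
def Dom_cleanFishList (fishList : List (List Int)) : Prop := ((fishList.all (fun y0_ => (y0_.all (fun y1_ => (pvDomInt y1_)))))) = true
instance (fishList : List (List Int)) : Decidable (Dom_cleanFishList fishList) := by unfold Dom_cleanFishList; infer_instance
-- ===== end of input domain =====

-- B replaces A's single accumulating pass (nine named variables, 9-way elif chain)
-- by nine staged filter-and-sum passes, one per timer bucket (objective: simpler).

-- ===== PORT A =====
-- A's loop body: nine accumulators, the same elif chain in the same order.
-- row[0] / row[1] are read with default 0; inside Pre_ the indices are always in range.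
def pvStepA (s : Int × Int × Int × Int × Int × Int × Int × Int × Int) (row : List Int) :
    Int × Int × Int × Int × Int × Int × Int × Int × Int :=
  match s with
  | (f0, f1, f2, f3, f4, f5, f6, f7, f8) =>
    let t := PySem.List.pyGetD row 0 0
    let c := PySem.List.pyGetD row 1 0
    if t = 0 then (f0 + c, f1, f2, f3, f4, f5, f6, f7, f8)
    else if t = 1 then (f0, f1 + c, f2, f3, f4, f5, f6, f7, f8)
    else if t = 2 then (f0, f1, f2 + c, f3, f4, f5, f6, f7, f8)
    else if t = 3 then (f0, f1, f2, f3 + c, f4, f5, f6, f7, f8)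
    else if t = 4 then (f0, f1, f2, f3, f4 + c, f5, f6, f7, f8)
    else if t = 5 then (f0, f1, f2, f3, f4, f5 + c, f6, f7, f8)
    else if t = 6 then (f0, f1, f2, f3, f4, f5, f6 + c, f7, f8)
    else if t = 7 then (f0, f1, f2, f3, f4, f5, f6, f7 + c, f8)
    else if t = 8 then (f0, f1, f2, f3, f4, f5, f6, f7, f8 + c)
    else (f0, f1, f2, f3, f4, f5, f6, f7, f8)

def cleanFishList (fishList : List (List Int)) : List (List Int) :=
  match fishList.foldl pvStepA (0, 0, 0, 0, 0, 0, 0, 0, 0) with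
  | (f0, f1, f2, f3, f4, f5, f6, f7, f8) =>
    [[0, f0], [1, f1], [2, f2], [3, f3], [4, f4], [5, f5], [6, f6], [7, f7], [8, f8]]

-- ===== PORT B =====
-- B: for each t in range(9), a filter-and-sum pass over fishList.
def cleanFishList_alt (fishList : List (List Int)) : List (List Int) :=
  (List.range 9).map (fun t =>
    [Int.ofNat t,
     ((fishList.filter (fun p => PySem.List.pyGetD p 0 0 == Int.ofNat t)).map
        (fun p => PySem.List.pyGetD p 1 0)).sum])

-- ===== PRECONDITION & SPEC =====
-- Pre_ excludes exactly the inputs on which Python A raises an IndexError: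
-- an empty inner list (fishList[x][0] raises), or a length-1 inner list whose
-- head is in 0..8 (the taken branch reads fishList[x][1]). B raises there too.
def Pre_cleanFishList (fishList : List (List Int)) : Prop :=
  ∀ row ∈ fishList, row ≠ [] ∧ (row.length = 1 → ¬ (0 ≤ row.headD 0 ∧ row.headD 0 ≤ 8))
instance (fishList : List (List Int)) : Decidable (Pre_cleanFishList fishList) := by
  unfold Pre_cleanFishList; infer_instance

def pvWitness_cleanFishList : List (List Int) := [[0, 5], [9, 3], [3, 2], [8, 1]]

def Spec_cleanFishList (fishList : List (List Int)) (out : List (List Int)) : Prop := out = cleanFishList_alt fishList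
instance (fishList : List (List Int)) (out : List (List Int)) : Decidable (Spec_cleanFishList fishList out) := by unfold Spec_cleanFishList; infer_instance

-- ===== CLAIM (what is proved, stated in full; the proofs are below) =====
def Claim_equal_cleanFishList : Prop := ∀ (fishList : List (List Int)), Dom_cleanFishList fishList → Pre_cleanFishList fishList → Spec_cleanFishList fishList (cleanFishList fishList)

-- ===== LEMMAS AND PROOFS =====

-- the bucket total B computes for timer t
def pvSumT (t : Int) (rows : List (List Int)) : Int :=
  ((rows.filter (fun p => PySem.List.pyGetD p 0 0 == t)).map
    (fun p => PySem.List.pyGetD p 1 0)).sum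

lemma pvSumT_cons (t : Int) (r : List Int) (rs : List (List Int)) :
    pvSumT t (r :: rs) =
      (if PySem.List.pyGetD r 0 0 = t then PySem.List.pyGetD r 1 0 else 0) + pvSumT t rs := by
  simp only [pvSumT, List.filter_cons]
  by_cases h : PySem.List.pyGetD r 0 0 = t <;> simp [h]

lemma pvFoldA_eq (rows : List (List Int)) (f0 f1 f2 f3 f4 f5 f6 f7 f8 : Int) :
    rows.foldl pvStepA (f0, f1, f2, f3, f4, f5, f6, f7, f8) =
      (f0 + pvSumT 0 rows, f1 + pvSumT 1 rows, f2 + pvSumT 2 rows,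
       f3 + pvSumT 3 rows, f4 + pvSumT 4 rows, f5 + pvSumT 5 rows,
       f6 + pvSumT 6 rows, f7 + pvSumT 7 rows, f8 + pvSumT 8 rows) := by
  induction rows generalizing f0 f1 f2 f3 f4 f5 f6 f7 f8 with
  | nil => simp [pvSumT]
  | cons r rs ih =>
    simp only [List.foldl_cons]
    rw [show (pvStepA (f0, f1, f2, f3, f4, f5, f6, f7, f8) r) =
        (let t := PySem.List.pyGetD r 0 0
         let c := PySem.List.pyGetD r 1 0
         if t = 0 then (f0 + c, f1, f2, f3, f4, f5, f6, f7, f8)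
         else if t = 1 then (f0, f1 + c, f2, f3, f4, f5, f6, f7, f8)
         else if t = 2 then (f0, f1, f2 + c, f3, f4, f5, f6, f7, f8)
         else if t = 3 then (f0, f1, f2, f3 + c, f4, f5, f6, f7, f8)
         else if t = 4 then (f0, f1, f2, f3, f4 + c, f5, f6, f7, f8)
         else if t = 5 then (f0, f1, f2, f3, f4, f5 + c, f6, f7, f8)
         else if t = 6 then (f0, f1, f2, f3, f4, f5, f6 + c, f7, f8)
         else if t = 7 then (f0, f1, f2, f3, f4, f5, f6, f7 + c, f8)
         else if t = 8 then (f0, f1, f2, f3, f4, f5, f6, f7, f8 + c)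
         else (f0, f1, f2, f3, f4, f5, f6, f7, f8)) from rfl]
    simp only []
    split_ifs with h0 h1 h2 h3 h4 h5 h6 h7 h8 <;>
      rw [ih] <;> simp_all [pvSumT_cons] <;> ring

-- ===== VERDICT (by name: the statement is the Claim_ definition above) =====
theorem cleanFishList_spec : Claim_equal_cleanFishList := by
  intro fishList _ _
  unfold Spec_cleanFishList cleanFishList cleanFishList_alt
  rw [pvFoldA_eq]
  simp [List.range_succ, pvSumT]
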